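-- pv_equiv track=rewrite | github.com/KisloTAooAnkit/Python-Programs | thrid.py | solve
-- ===== SOURCE A (Python) =====
-- import heapq
--
-- class Item:
--
--     def __init__(self,price,x,y,d) -> None:
--         self.x = x
--         self.y = y
--         self.d = d
--         self.price = price
--
--
--     def __gt__(self,other):
--
--         if self.d != other.d:
--             return self.d < other.d
--         elif self.price != other.price:
--             return self.price < other.price
--         elif self.x != other.x:
--             return self.x < other.x
--         else:
--             return self.y < other.y
--
-- def dfs(visited,grid,x,y,n,m,k,pq,d,pricing):
--     if x>=n or x<0 or y>=n or y<0:
--         return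
--     if visited[x][y] or grid[x][y] == 0:
--         return
--     visited[x][y] = True
--     if pricing[0] <= grid[x][y] <= pricing[1]:
--         if len(pq) == k:
--             heapq.heappushpop(pq,Item(grid[x][y],x,y,d))
--         else:
--             heapq.heappush(pq,Item(grid[x][y],x,y,d))
--
--     dfs(visited,grid,x+1,y,n,m,k,pq,d+1,pricing)
--     dfs(visited,grid,x,y+1,n,m,k,pq,d+1,pricing)
--     dfs(visited,grid,x-1,y,n,m,k,pq,d+1,pricing)
--     dfs(visited,grid,x,y-1,n,m,k,pq,d+1,pricing)
--     return
--
-- def solve(grid,pricing,start,k):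
--     n = len(grid)
--     m = len(grid[0])
--     v = [[False]*m for _ in range(n)]
--     pq = []
--     dfs(v,grid,start[0],start[1],n,m,k,pq,0,pricing)
--
--     ans = []
--     while(pq):
--         val = heapq.heappop(pq)
--         ans.append([val.x,val.y])
--     ans.sort()
--     return ans
-- ===== SOURCE B (Python) =====
-- import heapq
--
-- # Iterative re-implementation: explicit-stack DFS (mark on pop, neighbors pushed in
-- # reverse so the traversal order and depths match the recursive version) and plain
-- # negated 4-tuples on the heap instead of a class with a reversed __gt__; the answer
-- # is sorted straight from the heap's contents instead of popping the heap one by one.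
-- # Note: the y-bound is checked against n (the row count), exactly as in the original.
-- def solve(grid, pricing, start, k):
--     n = len(grid)
--     m = len(grid[0])
--     visited = [[False] * m for _ in range(n)]
--     pq = []
--     stack = [(start[0], start[1], 0)]
--     while stack:
--         x, y, d = stack.pop()
--         if x >= n or x < 0 or y >= n or y < 0:
--             continue
--         if visited[x][y] or grid[x][y] == 0:
--             continue
--         visited[x][y] = True
--         if pricing[0] <= grid[x][y] <= pricing[1]:
--             item = (-d, -grid[x][y], -x, -y)
--             if len(pq) == k:
--                 heapq.heappushpop(pq, item)
--             else:
--                 heapq.heappush(pq, item)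
--         stack.extend([(x, y - 1, d + 1), (x - 1, y, d + 1), (x, y + 1, d + 1), (x + 1, y, d + 1)])
--     return sorted([-t[2], -t[3]] for t in pq)
-- ===== Notes on version B (the rewrite author's own statement) =====
-- stated objective: idiomatic
-- what changed: The recursive DFS is re-decomposed as an iterative loop over an explicit stack (neighbors pushed in reverse, marked on pop, so traversal order and depths are identical), the Item class with its reversed __gt__ is replaced by plain negated 4-tuples on the heap, and the answer is sorted directly from the heap's contents instead of heap-popping one by one and then sorting.
-- outside the precondition, e.g. on solve([[1]], [5], [0, 0], 1): A returns [], B returns []; on solve([[1], [0]], [0, 5], [1, 0], 1): A returns [], B returns []; on solve([[0, 2], [3]], [0, 5], [0, 0], 1): A returns [], B returns []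
import Mathlib
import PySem

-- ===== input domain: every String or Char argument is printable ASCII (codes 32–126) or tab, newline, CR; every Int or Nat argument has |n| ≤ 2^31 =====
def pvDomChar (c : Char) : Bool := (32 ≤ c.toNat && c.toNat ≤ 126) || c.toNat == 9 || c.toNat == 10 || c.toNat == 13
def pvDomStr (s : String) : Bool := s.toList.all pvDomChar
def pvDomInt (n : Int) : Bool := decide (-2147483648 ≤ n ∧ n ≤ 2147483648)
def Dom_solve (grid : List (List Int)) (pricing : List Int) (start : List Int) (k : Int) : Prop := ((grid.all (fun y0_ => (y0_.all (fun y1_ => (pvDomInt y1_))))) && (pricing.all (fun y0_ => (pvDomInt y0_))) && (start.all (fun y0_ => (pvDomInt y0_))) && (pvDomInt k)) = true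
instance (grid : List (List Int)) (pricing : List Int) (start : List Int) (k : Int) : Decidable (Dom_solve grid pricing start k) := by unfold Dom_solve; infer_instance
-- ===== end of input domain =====

-- B rewrites A's recursive DFS as an explicit-stack loop and replaces the Item class +
-- pop-the-heap-then-sort ending by negated 4-tuples on the heap, sorted directly; same values.

-- ===== PORT A =====

-- Python's `Item` class: fields in constructor order Item(price, x, y, d).
structure Item where
  price : Int
  x : Int
  y : Int
  d : Int
deriving DecidableEq, Repr

def dummyItem : Item := ⟨0, 0, 0, 0⟩

-- Item.__gt__(self, other), literally.
def gtItem (s o : Item) : Bool :=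
  if s.d ≠ o.d then decide (s.d < o.d)
  else if s.price ≠ o.price then decide (s.price < o.price)
  else if s.x ≠ o.x then decide (s.x < o.x)
  else decide (s.y < o.y)

-- Python evaluates `a < b` on Items via the reflected method: b.__gt__(a).
def itemLT (a b : Item) : Bool := gtItem b a

-- ---- CPython's heapq, transliterated step for step (generic in the element order; both
-- ports instantiate it).  Lists are indexed with getD/set; every index reached is in range
-- (the loops only touch positions below the length), so this is exact.

-- heapq._siftdown(heap, startpos, pos), with newitem = heap[pos] read at entry.
def siftdownLoop {α : Type} (lt : α → α → Bool) (dummy : α) (heap : List α)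
    (startpos pos : Nat) (newitem : α) : List α :=
  if _h : startpos < pos then
    let parent := heap.getD ((pos - 1) / 2) dummy
    if lt newitem parent then
      siftdownLoop lt dummy (heap.set pos parent) startpos ((pos - 1) / 2) newitem
    else heap.set pos newitem
  else heap.set pos newitem
termination_by pos
decreasing_by omega

-- heapq._siftup(heap, pos), with newitem = heap[pos] read at entry and endpos = len(heap);
-- the two branches are Python's `childpos` bump to the right sibling, made explicit.
def siftupLoop {α : Type} (lt : α → α → Bool) (dummy : α) (heap : List α)
    (endpos startpos pos : Nat) (newitem : α) : List α :=
  if _h : 2 * pos + 1 < endpos then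
    if _h2 : 2 * pos + 2 < endpos ∧
        !(lt (heap.getD (2 * pos + 1) dummy) (heap.getD (2 * pos + 2) dummy)) then
      siftupLoop lt dummy (heap.set pos (heap.getD (2 * pos + 2) dummy)) endpos startpos (2 * pos + 2) newitem
    else
      siftupLoop lt dummy (heap.set pos (heap.getD (2 * pos + 1) dummy)) endpos startpos (2 * pos + 1) newitem
  else siftdownLoop lt dummy (heap.set pos newitem) startpos pos newitem
termination_by endpos - pos
decreasing_by all_goals omega

-- heapq.heappush(heap, item)
def pyHeappush {α : Type} (lt : α → α → Bool) (dummy : α) (heap : List α) (item : α) : List α :=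
  siftdownLoop lt dummy (heap ++ [item]) 0 heap.length item

-- heapq.heappushpop(heap, item); A discards the returned element, so only the heap is kept.
def pyHeappushpop {α : Type} (lt : α → α → Bool) (dummy : α) (heap : List α) (item : α) : List α :=
  if heap ≠ [] ∧ lt (heap.getD 0 dummy) item then
    siftupLoop lt dummy (heap.set 0 item) heap.length 0 0 item
  else heap

-- heapq.heappop(heap): (popped element, remaining heap).  Python raises IndexError on an
-- empty heap; A's while-loop only calls it on nonempty heaps, so that case is unreachable.
def pyHeappop {α : Type} (lt : α → α → Bool) (dummy : α) (heap : List α) : α × List α :=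
  let lastelt := (heap.getLast?).getD dummy
  let rest := heap.dropLast
  if rest ≠ [] then
    (rest.getD 0 dummy, siftupLoop lt dummy (rest.set 0 lastelt) rest.length 0 0 lastelt)
  else (lastelt, [])

-- ---- the visited matrix and the grid, indexed as Python does (in range under Pre_).
def gridGet (g : List (List Int)) (x y : Nat) : Int := (g.getD x []).getD y 0
-- default `true` outside the matrix: Python would raise there (excluded by Pre_), and it
-- doubles as the termination guard (a cell that cannot be marked is treated as visited).
def visGet (v : List (List Bool)) (x y : Nat) : Bool := (v.getD x []).getD y true
def visSet (v : List (List Bool)) (x y : Nat) : List (List Bool) := v.set x ((v.getD x []).set y true)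

-- number of unvisited cells: the DFS termination measure
def unvis (v : List (List Bool)) : Nat := (v.map (fun r => r.count false)).sum

-- the heap update A performs on a newly visited cell (`if pricing[0] <= grid[x][y] <=
-- pricing[1]: heappushpop if len(pq) == k else heappush`), inlined in Python, named here.
def pushA (pricing : List Int) (k : Int) (pq : List Item) (g x y d : Int) : List Item :=
  if pricing.getD 0 0 ≤ g ∧ g ≤ pricing.getD 1 0 then
    if (pq.length : Int) = k then pyHeappushpop itemLT dummyItem pq ⟨g, x, y, d⟩
    else pyHeappush itemLT dummyItem pq ⟨g, x, y, d⟩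
  else pq

-- dfs(visited, grid, x, y, n, m, k, pq, d, pricing): the mutated state (visited, pq) is
-- threaded.  The extra `fuel` argument is only a totality guard: every caller passes
-- fuel > unvis vis, each productive level marks a fresh cell, so fuel never reaches 0
-- (dfsA_fuel_congr below makes this precise); Python's dfs has no such argument.
def dfsA (grid : List (List Int)) (pricing : List Int) (n m k : Int) :
    Nat → List (List Bool) → List Item → Int → Int → Int → List (List Bool) × List Item
  | 0, vis, pq, _, _, _ => (vis, pq)
  | fuel + 1, vis, pq, x, y, d =>
    if x ≥ n ∨ x < 0 ∨ y ≥ n ∨ y < 0 then (vis, pq)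
    else if visGet vis x.toNat y.toNat || (gridGet grid x.toNat y.toNat == 0) then (vis, pq)
    else
      let vis1 := visSet vis x.toNat y.toNat
      let pq1 := pushA pricing k pq (gridGet grid x.toNat y.toNat) x y d
      let r1 := dfsA grid pricing n m k fuel vis1 pq1 (x + 1) y (d + 1)
      let r2 := dfsA grid pricing n m k fuel r1.1 r1.2 x (y + 1) (d + 1)
      let r3 := dfsA grid pricing n m k fuel r2.1 r2.2 (x - 1) y (d + 1)
      dfsA grid pricing n m k fuel r3.1 r3.2 x (y - 1) (d + 1)

-- the final `while pq: val = heapq.heappop(pq); ans.append([val.x, val.y])`.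
-- `fuel` is only a totality guard: each pop shortens the heap by one, and the caller
-- passes fuel = len(pq), so the 0 case is never reached (popAll_perm below uses this).
def popAll : Nat → List Item → List (List Int) → List (List Int)
  | 0, _, ans => ans
  | fuel + 1, pq, ans =>
    if pq = [] then ans
    else
      let r := pyHeappop itemLT dummyItem pq
      popAll fuel r.2 (ans ++ [[r.1.x, r.1.y]])

def solve (grid : List (List Int)) (pricing : List Int) (start : List Int) (k : Int) : List (List Int) :=
  let n : Int := grid.length
  let m : Int := (grid.headI).length   -- grid[0]: Pre_ gives grid ≠ []
  let v := List.replicate grid.length (List.replicate (grid.headI).length false)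
  let r := dfsA grid pricing n m k (unvis v + 1) v [] (start.getD 0 0) (start.getD 1 0) 0
  PySem.List.sorted (popAll r.2.length r.2 []) (fun a => a) false

-- ===== PORT B =====

-- B's heap holds plain 4-tuples (-d, -price, -x, -y), compared lexicographically as Python
-- compares tuples.
def Tup4 : Type := Int × Int × Int × Int
deriving DecidableEq

def dummyTup : Tup4 := (0, 0, 0, 0)

def tupLT (a b : Tup4) : Bool :=
  if a.1 ≠ b.1 then decide (a.1 < b.1)
  else if a.2.1 ≠ b.2.1 then decide (a.2.1 < b.2.1)
  else if a.2.2.1 ≠ b.2.2.1 then decide (a.2.2.1 < b.2.2.1)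
  else decide (a.2.2.2 < b.2.2.2)

def pushB (pricing : List Int) (k : Int) (pq : List Tup4) (g x y d : Int) : List Tup4 :=
  if pricing.getD 0 0 ≤ g ∧ g ≤ pricing.getD 1 0 then
    if (pq.length : Int) = k then pyHeappushpop tupLT dummyTup pq (-d, -g, -x, -y)
    else pyHeappush tupLT dummyTup pq (-d, -g, -x, -y)
  else pq

-- B's while-loop over the explicit stack; the Lean list's head is the top of Python's
-- list-tail stack, so Python's extend of the four reversed neighbours prepends them here.
-- `fuel` is only a totality guard: each iteration pops one entry and a productive one
-- marks a fresh cell while pushing four, so 4·(unvisited cells) + (stack size) bounds the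
-- iteration count and the caller's fuel is never exhausted (stackLoop_foldl uses this).
def stackLoop (grid : List (List Int)) (pricing : List Int) (n k : Int) :
    Nat → List (List Bool) → List Tup4 → List (Int × Int × Int) → List (List Bool) × List Tup4
  | 0, vis, pq, _ => (vis, pq)
  | _ + 1, vis, pq, [] => (vis, pq)
  | fuel + 1, vis, pq, (x, y, d) :: rest =>
    if x ≥ n ∨ x < 0 ∨ y ≥ n ∨ y < 0 then stackLoop grid pricing n k fuel vis pq rest
    else if visGet vis x.toNat y.toNat || (gridGet grid x.toNat y.toNat == 0) then
      stackLoop grid pricing n k fuel vis pq rest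
    else
      stackLoop grid pricing n k fuel (visSet vis x.toNat y.toNat)
        (pushB pricing k pq (gridGet grid x.toNat y.toNat) x y d)
        ([(x + 1, y, d + 1), (x, y + 1, d + 1), (x - 1, y, d + 1), (x, y - 1, d + 1)] ++ rest)

def solve_alt (grid : List (List Int)) (pricing : List Int) (start : List Int) (k : Int) : List (List Int) :=
  let n : Int := grid.length
  let v := List.replicate grid.length (List.replicate (grid.headI).length false)
  let r := stackLoop grid pricing n k (4 * unvis v + 1) v [] [(start.getD 0 0, start.getD 1 0, 0)]
  PySem.List.sorted (r.2.map (fun t => [-t.2.2.1, -t.2.2.2])) (fun a => a) false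

-- ===== PRECONDITION & SPEC =====
-- Pre_ excludes exactly the shapes on which A can raise IndexError — empty grid, start or
-- pricing shorter than 2, a row shorter than the row count, or more rows than columns (the
-- DFS bounds check uses n for BOTH axes, so such grids can index past a row's end) — except
-- that a start out of bounds (under that same n,n check) is admitted whatever the rest looks
-- like, since A then touches nothing; what remains outside are inputs of the bad shapes that
-- A survives only because the bad access is never reached (a zero wall at the start cell, a
-- short-circuited pricing[1]); see the cites in the claim.
def Pre_solve (grid : List (List Int)) (pricing : List Int) (start : List Int) (k : Int) : Prop :=
  grid ≠ [] ∧ 2 ≤ start.length ∧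
    ((start.getD 0 0 ≥ grid.length ∨ start.getD 0 0 < 0 ∨
      start.getD 1 0 ≥ grid.length ∨ start.getD 1 0 < 0) ∨
     (2 ≤ pricing.length ∧ grid.length ≤ (grid.headI).length ∧
      ∀ row ∈ grid, grid.length ≤ row.length))
instance (grid : List (List Int)) (pricing : List Int) (start : List Int) (k : Int) : Decidable (Pre_solve grid pricing start k) := by unfold Pre_solve; infer_instance

def pvWitness_solve : List (List Int) × List Int × List Int × Int :=
  ([[1, 2], [3, 0]], [1, 5], [0, 0], 3)

def Spec_solve (grid : List (List Int)) (pricing : List Int) (start : List Int) (k : Int) (out : List (List Int)) : Prop := out = solve_alt grid pricing start k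
instance (grid : List (List Int)) (pricing : List Int) (start : List Int) (k : Int) (out : List (List Int)) : Decidable (Spec_solve grid pricing start k out) := by unfold Spec_solve; infer_instance

-- ===== CLAIM (what is proved, stated in full; the proofs are below) =====
def Claim_equal_solve : Prop := ∀ (grid : List (List Int)) (pricing : List Int) (start : List Int) (k : Int), Dom_solve grid pricing start k → Pre_solve grid pricing start k → Spec_solve grid pricing start k (solve grid pricing start k)

-- ===== LEMMAS AND PROOFS =====

theorem siftdownLoop_length {α : Type} (lt : α → α → Bool) (dummy : α) (heap : List α)
    (startpos pos : Nat) (newitem : α) :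
    (siftdownLoop lt dummy heap startpos pos newitem).length = heap.length := by
  fun_induction siftdownLoop <;> simp_all

theorem siftupLoop_length {α : Type} (lt : α → α → Bool) (dummy : α) (heap : List α)
    (endpos startpos pos : Nat) (newitem : α) :
    (siftupLoop lt dummy heap endpos startpos pos newitem).length = heap.length := by
  fun_induction siftupLoop <;> simp_all [siftdownLoop_length]

theorem pyHeappop_length {α : Type} (lt : α → α → Bool) (dummy : α) (heap : List α)
    (h : heap ≠ []) : (pyHeappop lt dummy heap).2.length + 1 = heap.length := by
  unfold pyHeappop
  by_cases hr : heap.dropLast = []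
  · have h1 : heap.dropLast.length = 0 := by rw [hr]; rfl
    have := heap.length_dropLast
    have hl : heap.length ≠ 0 := by simpa using h
    simp [hr]
    omega
  · simp only [hr, ne_eq, not_false_iff, if_pos, siftupLoop_length]
    have hl : heap.length ≠ 0 := by simpa using h
    simp [List.length_dropLast]
    omega

theorem countFalse_set_lt (r : List Bool) (y : Nat) (h : r.getD y true = false) :
    (r.set y true).count false < r.count false := by
  induction r generalizing y with
  | nil => simp at h
  | cons b t ih =>
    cases y with
    | zero => simp_all
    | succ y' =>
      simp only [List.getD_cons_succ] at h
      have := ih y' h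
      cases b <;> simp_all

theorem unvis_visSet_lt (v : List (List Bool)) (x y : Nat) (h : visGet v x y = false) :
    unvis (visSet v x y) < unvis v := by
  induction v generalizing x with
  | nil => simp [visGet] at h
  | cons r t ih =>
    cases x with
    | zero =>
      simp only [visGet, List.getD_cons_zero] at h
      have := countFalse_set_lt r y h
      simp only [unvis, visSet, List.getD_cons_zero, List.set_cons_zero, List.map_cons,
        List.sum_cons]
      omega
    | succ x' =>
      simp only [visGet, List.getD_cons_succ] at h
      have := ih x' h
      simp only [unvis, visSet, List.getD_cons_succ, List.set_cons_succ, List.map_cons,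
        List.sum_cons] at *
      omega

-- the Item ↔ tuple correspondence: B stores exactly itemToTup of what A stores.
def itemToTup (v : Item) : Tup4 := (-v.d, -v.price, -v.x, -v.y)

theorem lt_compat (a b : Item) : tupLT (itemToTup a) (itemToTup b) = itemLT a b := by
  simp only [tupLT, itemToTup, itemLT, gtItem]
  split_ifs <;> first | rfl | omega | (rw [decide_eq_decide]; omega)

theorem siftdownLoop_map {α β : Type} (f : α → β) (lt₁ : α → α → Bool) (lt₂ : β → β → Bool)
    (d₁ : α) (hc : ∀ a b, lt₂ (f a) (f b) = lt₁ a b) (heap : List α) (sp pos : Nat) (ni : α) :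
    siftdownLoop lt₂ (f d₁) (heap.map f) sp pos (f ni)
      = (siftdownLoop lt₁ d₁ heap sp pos ni).map f := by
  fun_induction siftdownLoop lt₁ d₁ heap sp pos ni with
  | case1 heap pos h parent hlt ih =>
    rw [siftdownLoop, dif_pos h]
    dsimp only
    rw [List.getD_map, hc, if_pos hlt, ← List.map_set]
    exact ih
  | case2 heap pos h parent hlt =>
    rw [siftdownLoop, dif_pos h]
    dsimp only
    rw [List.getD_map, hc, if_neg hlt, List.map_set]
  | case3 heap pos h =>
    rw [siftdownLoop, dif_neg h, List.map_set]

theorem siftupLoop_map {α β : Type} (f : α → β) (lt₁ : α → α → Bool) (lt₂ : β → β → Bool)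
    (d₁ : α) (hc : ∀ a b, lt₂ (f a) (f b) = lt₁ a b) (heap : List α) (ep sp pos : Nat) (ni : α) :
    siftupLoop lt₂ (f d₁) (heap.map f) ep sp pos (f ni)
      = (siftupLoop lt₁ d₁ heap ep sp pos ni).map f := by
  fun_induction siftupLoop lt₁ d₁ heap ep sp pos ni with
  | case1 heap pos h h2 ih =>
    rw [siftupLoop, dif_pos h, dif_pos (by rw [List.getD_map, List.getD_map, hc]; exact h2),
      List.getD_map, ← List.map_set]
    exact ih
  | case2 heap pos h h2 ih =>
    rw [siftupLoop, dif_pos h, dif_neg (by rw [List.getD_map, List.getD_map, hc]; exact h2),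
      List.getD_map, ← List.map_set]
    exact ih
  | case3 heap pos h =>
    rw [siftupLoop, dif_neg h, ← List.map_set, siftdownLoop_map f lt₁ lt₂ d₁ hc]

theorem pyHeappush_map {α β : Type} (f : α → β) (lt₁ : α → α → Bool) (lt₂ : β → β → Bool)
    (d₁ : α) (hc : ∀ a b, lt₂ (f a) (f b) = lt₁ a b) (heap : List α) (item : α) :
    pyHeappush lt₂ (f d₁) (heap.map f) (f item) = (pyHeappush lt₁ d₁ heap item).map f := by
  unfold pyHeappush
  have h1 : List.map f heap ++ [f item] = List.map f (heap ++ [item]) := by simp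
  rw [h1, List.length_map, siftdownLoop_map f lt₁ lt₂ d₁ hc]

theorem pyHeappushpop_map {α β : Type} (f : α → β) (lt₁ : α → α → Bool) (lt₂ : β → β → Bool)
    (d₁ : α) (hc : ∀ a b, lt₂ (f a) (f b) = lt₁ a b) (heap : List α) (item : α) :
    pyHeappushpop lt₂ (f d₁) (heap.map f) (f item) = (pyHeappushpop lt₁ d₁ heap item).map f := by
  unfold pyHeappushpop
  by_cases hn : heap = []
  · simp [hn]
  · rw [List.getD_map, hc]
    by_cases hlt : lt₁ (heap.getD 0 d₁) item = true
    · rw [if_pos ⟨by simp [hn], hlt⟩, if_pos ⟨hn, hlt⟩, ← List.map_set, List.length_map,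
        siftupLoop_map f lt₁ lt₂ d₁ hc]
    · rw [if_neg (fun hcon => hlt hcon.2), if_neg (fun hcon => hlt hcon.2)]

theorem pushB_map (pricing : List Int) (k : Int) (pq : List Item) (g x y d : Int) :
    pushB pricing k (pq.map itemToTup) g x y d = (pushA pricing k pq g x y d).map itemToTup := by
  unfold pushA pushB
  by_cases hp : pricing.getD 0 0 ≤ g ∧ g ≤ pricing.getD 1 0
  · rw [if_pos hp, if_pos hp, List.length_map]
    by_cases hk : (pq.length : Int) = k
    · rw [if_pos hk, if_pos hk]
      have := pyHeappushpop_map itemToTup itemLT tupLT dummyItem lt_compat pq ⟨g, x, y, d⟩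
      simpa [itemToTup, dummyItem, dummyTup] using this
    · rw [if_neg hk, if_neg hk]
      have := pyHeappush_map itemToTup itemLT tupLT dummyItem lt_compat pq ⟨g, x, y, d⟩
      simpa [itemToTup, dummyItem, dummyTup] using this
  · rw [if_neg hp, if_neg hp]

-- one step of A's recursion, as a fold step over the state (visited, pq); it feeds the
-- dfs just enough fuel, which dfsA_fuel_congr shows is as good as any larger amount.
def stepA (grid : List (List Int)) (pricing : List Int) (n m k : Int)
    (s : List (List Bool) × List Item) (t : Int × Int × Int) : List (List Bool) × List Item :=
  dfsA grid pricing n m k (unvis s.1 + 1) s.1 s.2 t.1 t.2.1 t.2.2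

theorem dfsA_mono (grid : List (List Int)) (pricing : List Int) (n m k : Int) :
    ∀ (fuel : Nat) (vis : List (List Bool)) (pq : List Item) (x y d : Int),
      unvis (dfsA grid pricing n m k fuel vis pq x y d).1 ≤ unvis vis := by
  intro fuel
  induction fuel with
  | zero => intro vis pq x y d; exact le_refl _
  | succ g ih =>
    intro vis pq x y d
    rw [dfsA]
    by_cases hb : x ≥ n ∨ x < 0 ∨ y ≥ n ∨ y < 0
    · rw [if_pos hb]
    · rw [if_neg hb]
      by_cases hv : (visGet vis x.toNat y.toNat || (gridGet grid x.toNat y.toNat == 0)) = true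
      · rw [if_pos hv]
      · rw [if_neg hv]
        have h1 : unvis (visSet vis x.toNat y.toNat) < unvis vis :=
          unvis_visSet_lt _ _ _ (by simp only [Bool.or_eq_true, not_or] at hv; simpa using hv.1)
        exact le_trans (ih _ _ _ _ _) (le_trans (ih _ _ _ _ _)
          (le_trans (ih _ _ _ _ _) (le_trans (ih _ _ _ _ _) (le_of_lt h1))))

theorem dfsA_fuel_congr (grid : List (List Int)) (pricing : List Int) (n m k : Int) :
    ∀ (f1 f2 : Nat) (vis : List (List Bool)) (pq : List Item) (x y d : Int),
      unvis vis < f1 → unvis vis < f2 →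
      dfsA grid pricing n m k f1 vis pq x y d = dfsA grid pricing n m k f2 vis pq x y d := by
  intro f1
  induction f1 with
  | zero => intro f2 vis pq x y d h1; omega
  | succ g1 ih =>
    intro f2 vis pq x y d h1 h2
    cases f2 with
    | zero => omega
    | succ g2 =>
      rw [dfsA, dfsA]
      by_cases hb : x ≥ n ∨ x < 0 ∨ y ≥ n ∨ y < 0
      · rw [if_pos hb, if_pos hb]
      · rw [if_neg hb, if_neg hb]
        by_cases hv : (visGet vis x.toNat y.toNat || (gridGet grid x.toNat y.toNat == 0)) = true
        · rw [if_pos hv, if_pos hv]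
        · rw [if_neg hv, if_neg hv]
          have h0 : unvis (visSet vis x.toNat y.toNat) < unvis vis :=
            unvis_visSet_lt _ _ _ (by simp only [Bool.or_eq_true, not_or] at hv; simpa using hv.1)
          dsimp only
          set vis1 := visSet vis x.toNat y.toNat
          set pq1 := pushA pricing k pq (gridGet grid x.toNat y.toNat) x y d
          have e1 : dfsA grid pricing n m k g1 vis1 pq1 (x + 1) y (d + 1)
              = dfsA grid pricing n m k g2 vis1 pq1 (x + 1) y (d + 1) :=
            ih g2 vis1 pq1 (x + 1) y (d + 1) (by omega) (by omega)
          have m1 := dfsA_mono grid pricing n m k g2 vis1 pq1 (x + 1) y (d + 1)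
          rw [e1]
          set r1 := dfsA grid pricing n m k g2 vis1 pq1 (x + 1) y (d + 1)
          have e2 : dfsA grid pricing n m k g1 r1.1 r1.2 x (y + 1) (d + 1)
              = dfsA grid pricing n m k g2 r1.1 r1.2 x (y + 1) (d + 1) :=
            ih g2 r1.1 r1.2 x (y + 1) (d + 1) (by omega) (by omega)
          have m2 := dfsA_mono grid pricing n m k g2 r1.1 r1.2 x (y + 1) (d + 1)
          rw [e2]
          set r2 := dfsA grid pricing n m k g2 r1.1 r1.2 x (y + 1) (d + 1)
          have e3 : dfsA grid pricing n m k g1 r2.1 r2.2 (x - 1) y (d + 1)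
              = dfsA grid pricing n m k g2 r2.1 r2.2 (x - 1) y (d + 1) :=
            ih g2 r2.1 r2.2 (x - 1) y (d + 1) (by omega) (by omega)
          have m3 := dfsA_mono grid pricing n m k g2 r2.1 r2.2 (x - 1) y (d + 1)
          rw [e3]
          set r3 := dfsA grid pricing n m k g2 r2.1 r2.2 (x - 1) y (d + 1)
          exact ih g2 r3.1 r3.2 x (y - 1) (d + 1) (by omega) (by omega)

theorem dfsA_stop (grid : List (List Int)) (pricing : List Int) (n m k : Int)
    (vis : List (List Bool)) (pq : List Item) (x y d : Int)
    (hg : (x ≥ n ∨ x < 0 ∨ y ≥ n ∨ y < 0) ∨ (visGet vis x.toNat y.toNat || (gridGet grid x.toNat y.toNat == 0)) = true) :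
    stepA grid pricing n m k (vis, pq) (x, y, d) = (vis, pq) := by
  rw [stepA]
  dsimp only
  rw [dfsA]
  rcases hg with hg | hg
  · rw [if_pos hg]
  · by_cases hb : x ≥ n ∨ x < 0 ∨ y ≥ n ∨ y < 0
    · rw [if_pos hb]
    · rw [if_neg hb, if_pos hg]

theorem dfsA_step (grid : List (List Int)) (pricing : List Int) (n m k : Int)
    (vis : List (List Bool)) (pq : List Item) (x y d : Int)
    (hb : ¬(x ≥ n ∨ x < 0 ∨ y ≥ n ∨ y < 0))
    (hv : ¬(visGet vis x.toNat y.toNat || (gridGet grid x.toNat y.toNat == 0)) = true) :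
    stepA grid pricing n m k (vis, pq) (x, y, d) =
      List.foldl (stepA grid pricing n m k)
        (visSet vis x.toNat y.toNat, pushA pricing k pq (gridGet grid x.toNat y.toNat) x y d)
        [(x + 1, y, d + 1), (x, y + 1, d + 1), (x - 1, y, d + 1), (x, y - 1, d + 1)] := by
  rw [stepA]
  dsimp only
  rw [dfsA, if_neg hb, if_neg hv]
  simp only [List.foldl, stepA]
  have h0 : unvis (visSet vis x.toNat y.toNat) < unvis vis :=
    unvis_visSet_lt _ _ _ (by simp only [Bool.or_eq_true, not_or] at hv; simpa using hv.1)
  set vis1 := visSet vis x.toNat y.toNat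
  set pq1 := pushA pricing k pq (gridGet grid x.toNat y.toNat) x y d
  have e1 : dfsA grid pricing n m k (unvis vis) vis1 pq1 (x + 1) y (d + 1)
      = dfsA grid pricing n m k (unvis vis1 + 1) vis1 pq1 (x + 1) y (d + 1) :=
    dfsA_fuel_congr grid pricing n m k _ _ vis1 pq1 (x + 1) y (d + 1) (by omega) (by omega)
  have m1 := dfsA_mono grid pricing n m k (unvis vis1 + 1) vis1 pq1 (x + 1) y (d + 1)
  rw [e1]
  set r1 := dfsA grid pricing n m k (unvis vis1 + 1) vis1 pq1 (x + 1) y (d + 1)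
  have e2 : dfsA grid pricing n m k (unvis vis) r1.1 r1.2 x (y + 1) (d + 1)
      = dfsA grid pricing n m k (unvis r1.1 + 1) r1.1 r1.2 x (y + 1) (d + 1) :=
    dfsA_fuel_congr grid pricing n m k _ _ r1.1 r1.2 x (y + 1) (d + 1) (by omega) (by omega)
  have m2 := dfsA_mono grid pricing n m k (unvis r1.1 + 1) r1.1 r1.2 x (y + 1) (d + 1)
  rw [e2]
  set r2 := dfsA grid pricing n m k (unvis r1.1 + 1) r1.1 r1.2 x (y + 1) (d + 1)
  have e3 : dfsA grid pricing n m k (unvis vis) r2.1 r2.2 (x - 1) y (d + 1)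
      = dfsA grid pricing n m k (unvis r2.1 + 1) r2.1 r2.2 (x - 1) y (d + 1) :=
    dfsA_fuel_congr grid pricing n m k _ _ r2.1 r2.2 (x - 1) y (d + 1) (by omega) (by omega)
  have m3 := dfsA_mono grid pricing n m k (unvis r2.1 + 1) r2.1 r2.2 (x - 1) y (d + 1)
  rw [e3]
  set r3 := dfsA grid pricing n m k (unvis r2.1 + 1) r2.1 r2.2 (x - 1) y (d + 1)
  exact dfsA_fuel_congr grid pricing n m k _ _ r3.1 r3.2 x (y - 1) (d + 1) (by omega) (by omega)

theorem stackLoop_foldl (grid : List (List Int)) (pricing : List Int) (n m k : Int) :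
    ∀ (fuel : Nat) (vis : List (List Bool)) (pq : List Tup4) (stack : List (Int × Int × Int))
      (pqA : List Item), pq = pqA.map itemToTup → 4 * unvis vis + stack.length ≤ fuel →
      stackLoop grid pricing n k fuel vis pq stack =
        ((List.foldl (stepA grid pricing n m k) (vis, pqA) stack).1,
         (List.foldl (stepA grid pricing n m k) (vis, pqA) stack).2.map itemToTup) := by
  intro fuel
  induction fuel with
  | zero =>
    intro vis pq stack pqA hpq hf
    have : stack = [] := List.eq_nil_of_length_eq_zero (by omega)
    subst this
    simp [stackLoop, hpq]
  | succ g ih =>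
    intro vis pq stack pqA hpq hf
    match stack with
    | [] => simp [stackLoop, hpq]
    | (x, y, d) :: rest =>
      rw [stackLoop]
      by_cases hb : x ≥ n ∨ x < 0 ∨ y ≥ n ∨ y < 0
      · rw [if_pos hb, List.foldl_cons,
          dfsA_stop grid pricing n m k vis pqA x y d (Or.inl hb)]
        exact ih vis pq rest pqA hpq (by simp at hf ⊢; omega)
      · rw [if_neg hb]
        by_cases hv : (visGet vis x.toNat y.toNat || (gridGet grid x.toNat y.toNat == 0)) = true
        · rw [if_pos hv, List.foldl_cons,
            dfsA_stop grid pricing n m k vis pqA x y d (Or.inr hv)]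
          exact ih vis pq rest pqA hpq (by simp at hf ⊢; omega)
        · rw [if_neg hv]
          have h0 : unvis (visSet vis x.toNat y.toNat) < unvis vis :=
            unvis_visSet_lt _ _ _ (by simp only [Bool.or_eq_true, not_or] at hv; simpa using hv.1)
          have hpush : pushB pricing k pq (gridGet grid x.toNat y.toNat) x y d
              = (pushA pricing k pqA (gridGet grid x.toNat y.toNat) x y d).map itemToTup := by
            rw [hpq, pushB_map]
          rw [ih _ _ _ _ hpush (by simp at hf ⊢; omega), List.foldl_cons,
            dfsA_step grid pricing n m k vis pqA x y d hb hv, List.foldl_append]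

-- ---- multiset bookkeeping for the final pop-all loop

theorem set_swap_perm {α : Type} (l : List α) (i : Nat) (a b : α) (hi : i < l.length) :
    (a :: l.set i b).Perm (b :: l.set i a) := by
  induction l generalizing i with
  | nil => simp at hi
  | cons hd tl ih =>
    cases i with
    | zero => exact List.Perm.swap _ _ _
    | succ i' =>
      simp only [List.set_cons_succ]
      exact (List.Perm.swap _ _ _).trans (((ih i' (by simpa using hi)).cons hd).trans (List.Perm.swap _ _ _))

theorem set_set_perm {α : Type} (l : List α) (i j : Nat) (a d : α)
    (hij : i ≠ j) (hi : i < l.length) (hj : j < l.length) :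
    ((l.set i (l.getD j d)).set j a).Perm (l.set i a) := by
  induction l generalizing i j with
  | nil => simp at hi
  | cons hd tl ih =>
    cases i with
    | zero =>
      cases j with
      | zero => omega
      | succ j' =>
        simp only [List.set_cons_zero, List.getD_cons_succ, List.set_cons_succ]
        have hj' : j' < tl.length := by simpa using hj
        exact ((set_swap_perm tl j' _ a hj').trans (by rw [List.getD_eq_getElem _ _ hj', List.set_getElem_self]))
    | succ i' =>
      cases j with
      | zero =>
        simp only [List.getD_cons_zero, List.set_cons_succ, List.set_cons_zero]
        exact set_swap_perm tl i' a hd (by simpa using hi)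
      | succ j' =>
        simp only [List.set_cons_succ, List.getD_cons_succ]
        exact (ih i' j' (by omega) (by simpa using hi) (by simpa using hj)).cons hd

theorem siftdownLoop_perm {α : Type} (lt : α → α → Bool) (dummy : α) (heap : List α)
    (sp pos : Nat) (ni : α) (hp : pos < heap.length) :
    (siftdownLoop lt dummy heap sp pos ni).Perm (heap.set pos ni) := by
  revert hp
  fun_induction siftdownLoop with
  | case1 heap pos h parent hlt ih =>
    intro hp
    exact (ih (by simp; omega)).trans
      (set_set_perm heap pos ((pos-1)/2) ni dummy (by omega) hp (by omega))
  | case2 => intro hp; exact List.Perm.refl _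
  | case3 => intro hp; exact List.Perm.refl _

theorem siftupLoop_perm {α : Type} (lt : α → α → Bool) (dummy : α) (heap : List α)
    (ep sp pos : Nat) (ni : α) (hp : pos < ep) (he : ep = heap.length) :
    (siftupLoop lt dummy heap ep sp pos ni).Perm (heap.set pos ni) := by
  revert hp he
  fun_induction siftupLoop with
  | case1 heap pos h h2 ih =>
    intro hp he
    have := ih (by omega) (by simpa using he)
    exact this.trans (set_set_perm heap pos (2*pos+2) ni dummy (by omega) (by omega) (by omega))
  | case2 heap pos h h2 ih =>
    intro hp he
    have := ih (by omega) (by simpa using he)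
    exact this.trans (set_set_perm heap pos (2*pos+1) ni dummy (by omega) (by omega) (by omega))
  | case3 heap pos h =>
    intro hp he
    exact (siftdownLoop_perm lt dummy _ sp pos ni (by simp; omega)).trans (by rw [List.set_set])

theorem pyHeappop_perm {α : Type} (lt : α → α → Bool) (dummy : α) (pq : List α) (h : pq ≠ []) :
    ((pyHeappop lt dummy pq).1 :: (pyHeappop lt dummy pq).2).Perm pq := by
  have hsplit : pq.dropLast ++ [(pq.getLast?).getD dummy] = pq := by
    rw [List.getLast?_eq_some_getLast h]
    exact List.dropLast_concat_getLast h
  unfold pyHeappop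
  by_cases hr : pq.dropLast = []
  · simp only [hr, ne_eq, not_true_eq_false, if_neg, not_false_eq_true]
    simp only [hr] at hsplit
    simp only [List.nil_append] at hsplit
    rw [← hsplit]
    exact List.Perm.refl _
  · simp only [hr, ne_eq, not_false_eq_true, if_pos]
    rcases hd : pq.dropLast with _ | ⟨r0, rtl⟩
    · exact absurd hd hr
    · set L := (pq.getLast?).getD dummy with hL
      have hperm := siftupLoop_perm lt dummy ((r0 :: rtl).set 0 L)
        (r0 :: rtl).length 0 0 L (by simp) (by simp)
      rw [List.set_set, List.set_cons_zero] at hperm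
      refine List.Perm.trans (List.Perm.cons _ hperm) ?_
      -- r0 :: L :: rtl  ~  pq = (r0 :: rtl) ++ [L]
      rw [← hsplit, hd]
      simp only [List.getD_cons_zero, List.cons_append]
      exact List.Perm.cons r0 ((List.perm_append_singleton L rtl).symm)

theorem popAll_perm : ∀ (fuel : Nat) (pq : List Item) (ans : List (List Int)),
    pq.length ≤ fuel →
    (popAll fuel pq ans).Perm (ans ++ pq.map (fun v => [v.x, v.y])) := by
  intro fuel
  induction fuel with
  | zero =>
    intro pq ans hf
    have : pq = [] := List.eq_nil_of_length_eq_zero (by omega)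
    subst this
    simp [popAll]
  | succ g ih =>
    intro pq ans hf
    rw [popAll]
    by_cases h : pq = []
    · subst h; simp
    · rw [if_neg h]
      have hlen := pyHeappop_length itemLT dummyItem pq h
      have hpop := pyHeappop_perm itemLT dummyItem pq h
      have hmap : ([(pyHeappop itemLT dummyItem pq).1.x, (pyHeappop itemLT dummyItem pq).1.y]
            :: (pyHeappop itemLT dummyItem pq).2.map (fun v => [v.x, v.y])).Perm
          (pq.map (fun v => [v.x, v.y])) := by
        have := hpop.map (fun v => [v.x, v.y])
        simpa using this
      refine (ih _ _ (by omega)).trans ?_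
      rw [List.append_assoc]
      refine List.Perm.append_left ans ?_
      simpa using hmap

-- ===== VERDICT (by name: the statement is the Claim_ definition above) =====
theorem solve_spec : Claim_equal_solve := by
  unfold Claim_equal_solve
  intro grid pricing start k _hdom _hpre
  unfold Spec_solve solve solve_alt
  dsimp only
  have hmain := stackLoop_foldl grid pricing (grid.length : Int) ((grid.headI).length : Int) k
    (4 * unvis (List.replicate grid.length (List.replicate (grid.headI).length false)) + 1)
    (List.replicate grid.length (List.replicate (grid.headI).length false)) []
    [(start.getD 0 0, start.getD 1 0, 0)] [] (by simp) (by simp)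
  rw [hmain]
  simp only [List.foldl_cons, List.foldl_nil]
  set r := stepA grid pricing (grid.length : Int) ((grid.headI).length : Int) k
    (List.replicate grid.length (List.replicate (grid.headI).length false), [])
    (start.getD 0 0, start.getD 1 0, 0) with hr
  have hcomp : (r.2.map itemToTup).map (fun t : Tup4 => [-t.2.2.1, -t.2.2.2])
      = r.2.map (fun v => [v.x, v.y]) := by
    rw [List.map_map]
    apply List.map_congr_left
    intro a _
    simp [itemToTup]
  rw [hcomp]
  have hperm : (popAll r.2.length r.2 []).Perm (r.2.map (fun v => [v.x, v.y])) := by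
    simpa using popAll_perm r.2.length r.2 [] (le_refl _)
  have hfin := PySem.List.sorted_eq_sorted_of_perm (popAll r.2.length r.2 [])
    (r.2.map (fun v => [v.x, v.y])) (fun a => a) (fun a b hab => hab) hperm
  convert hfin using 2 <;> exact Subsingleton.elim _ _
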